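-- pv_equiv track=rewrite | github.com/Tom-2013-06417/practice-problems | problem_1.py | solution
-- ===== SOURCE A (Python) =====
-- def solution(s):
--     for width in range(len(s)):
--         window = s[0:width+1]
--         splittedString = s.split(window)
--         mappedPartitions = [partition == '' for partition in splittedString]
--         count = len(mappedPartitions) - 1
--         if (all(mappedPartitions)):
--             return count if count > 1 else 0
--     return 0
-- ===== SOURCE B (Python) =====
-- def solution(s):
--     n = len(s)
--     if n == 0:
--         return 0
--     i = (s + s).find(s, 1)
--     return n // i if i < n else 0
-- ===== Notes on version B (the rewrite author's own statement) =====
-- stated objective: faster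
-- what changed: Replaces A's loop over all prefix widths (each doing an O(n) str.split) with the doubled-string trick: a single substring search i=(s+s).find(s,1) yields the smallest period, returning n//i if i<n else 0.
import Mathlib
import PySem

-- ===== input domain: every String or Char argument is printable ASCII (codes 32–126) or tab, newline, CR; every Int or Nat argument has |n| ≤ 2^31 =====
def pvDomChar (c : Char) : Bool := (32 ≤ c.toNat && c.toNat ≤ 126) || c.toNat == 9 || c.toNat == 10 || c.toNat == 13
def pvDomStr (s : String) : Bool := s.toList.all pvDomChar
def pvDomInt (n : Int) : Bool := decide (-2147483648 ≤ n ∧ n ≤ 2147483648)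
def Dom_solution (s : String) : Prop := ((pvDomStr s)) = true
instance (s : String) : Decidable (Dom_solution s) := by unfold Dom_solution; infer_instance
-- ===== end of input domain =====

-- B replaces A's loop over prefix widths (each doing a full str.split) by the
-- doubled-string trick: one substring search i = (s+s).find(s, 1) yields the
-- smallest period; return n//i if i < n else 0 (objective: faster).

-- ===== PORT A =====
-- for width in range(len(s)): window = s[0:width+1]; parts = s.split(window); ...
-- s.split(window) is ported as PySem.Chars.splitOn: window is a nonempty prefix of s
-- whenever the loop body runs (width+1 ≥ 1 and s ≠ ''), so Python's sep ≠ '' rule holds.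
def solutionAux (cs : List Char) : List Int → Int
  | [] => 0
  | width :: rest =>
      let window := PySem.List.slice cs (some 0) (some (width + 1))
      let splittedString := PySem.Chars.splitOn cs window
      let mappedPartitions := splittedString.map (fun partition => partition == ([] : List Char))
      let count : Int := (mappedPartitions.length : Int) - 1
      if mappedPartitions.all (fun b => b) then (if count > 1 then count else 0)
      else solutionAux cs rest

def solution (s : String) : Int :=
  solutionAux s.toList (PySem.List.pyRange 0 (s.toList.length : Int) 1)

-- ===== PORT B =====
-- n = len(s); if n == 0: return 0; i = (s + s).find(s, 1); return n // i if i < n else 0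
def solution_alt (s : String) : Int :=
  let n : Int := (s.toList.length : Int)
  if n = 0 then 0
  else
    let i := PySem.Str.findFrom (s ++ s) s 1
    if i < n then PySem.Int.floordiv n i else 0

-- ===== PRECONDITION & SPEC =====
def Spec_solution (s : String) (out : Int) : Prop := out = solution_alt s
instance (s : String) (out : Int) : Decidable (Spec_solution s out) := by unfold Spec_solution; infer_instance

-- ===== CLAIM (what is proved, stated in full; the proofs are below) =====
def Claim_equal_solution : Prop := ∀ (s : String), Dom_solution s → Spec_solution s (solution s)

-- ===== LEMMAS AND PROOFS =====

-- `rep k w` = w repeated k times (the tiling shape A detects)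
def rep (k : Nat) (w : List Char) : List Char := (List.replicate k w).flatten

theorem rep_succ (k : Nat) (w : List Char) : rep (k + 1) w = w ++ rep k w := by
  simp [rep, List.replicate_succ]

theorem rep_succ' (k : Nat) (w : List Char) : rep (k + 1) w = rep k w ++ w := by
  simp [rep, List.replicate_succ']

theorem length_rep (k : Nat) (w : List Char) : (rep k w).length = k * w.length := by
  induction k with
  | zero => simp [rep]
  | succ k ih => rw [rep_succ]; simp [ih]; ring

-- one-step equations of PySem.Chars.splitOn.go (all rfl)
theorem go_succ_nil (w cur : List Char) (f : Nat) (acc : List (List Char)) :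
    PySem.Chars.splitOn.go w (f + 1) [] cur acc = (cur.reverse :: acc).reverse := rfl

theorem go_succ_cons (w cur : List Char) (f : Nat) (acc : List (List Char)) (c : Char) (r : List Char) :
    PySem.Chars.splitOn.go w (f + 1) (c :: r) cur acc =
      if w.isPrefixOf (c :: r) then
        PySem.Chars.splitOn.go w f ((c :: r).drop w.length) [] (cur.reverse :: acc)
      else PySem.Chars.splitOn.go w f r (c :: cur) acc := rfl

-- splitting an exact tiling: every part is empty and there are k+1 parts
theorem go_rep (w : List Char) (hw : w ≠ []) :
    ∀ (k fuel : Nat) (acc : List (List Char)), (rep k w).length < fuel →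
      PySem.Chars.splitOn.go w fuel (rep k w) [] acc
        = (List.replicate (k + 1) ([] : List Char) ++ acc).reverse := by
  intro k
  induction k with
  | zero =>
      intro fuel acc hf
      cases fuel with
      | zero => omega
      | succ f => simp [rep, go_succ_nil]
  | succ k ih =>
      intro fuel acc hf
      cases fuel with
      | zero => omega
      | succ f =>
          obtain ⟨a, w', rfl⟩ : ∃ a w', w = a :: w' := by
            cases w with | nil => exact absurd rfl hw | cons a w' => exact ⟨a, w', rfl⟩
          rw [rep_succ]
          have hpre : (a :: w').isPrefixOf ((a :: w') ++ rep k (a :: w')) = true := by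
            simp [List.isPrefixOf_iff_prefix]
          have hstep := go_succ_cons (a :: w') [] f acc a (w' ++ rep k (a :: w'))
          simp only [List.cons_append] at hstep ⊢
          rw [hstep]
          rw [if_pos (by simpa using hpre)]
          have hdrop : (a :: (w' ++ rep k (a :: w'))).drop (a :: w').length = rep k (a :: w') := by
            have h := List.drop_left (l₁ := a :: w') (l₂ := rep k (a :: w'))
            simpa using h
          rw [hdrop]
          have hlt : (rep k (a :: w')).length < f := by
            have h3 : (rep (k + 1) (a :: w')).length = (a :: w').length + (rep k (a :: w')).length := by
              rw [rep_succ]; simp; omega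
            have h4 : (a :: w').length = w'.length + 1 := by simp
            omega
          rw [ih f (([] : List Char).reverse :: acc) hlt]
          simp [List.replicate_succ']

theorem splitOn_rep (w : List Char) (hw : w ≠ []) (k : Nat) :
    PySem.Chars.splitOn (rep k w) w = List.replicate (k + 1) ([] : List Char) := by
  unfold PySem.Chars.splitOn
  rw [go_rep w hw k ((rep k w).length + 1) [] (by omega)]
  simp

-- converse: if every part of go is empty then the input is an exact tiling by w
theorem go_allEmpty (w : List Char) (hw : w ≠ []) :
    ∀ (fuel : Nat) (l cur : List Char) (acc : List (List Char)), l.length < fuel →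
      (((PySem.Chars.splitOn.go w fuel l cur acc).all (fun p => p == ([] : List Char))) = true
        ↔ ((∀ a ∈ acc, a = []) ∧ cur = [] ∧ ∃ k, l = rep k w)) := by
  intro fuel
  induction fuel with
  | zero => intro l cur acc h; omega
  | succ f ih =>
      intro l cur acc h
      cases l with
      | nil =>
          rw [go_succ_nil]
          simp only [List.all_reverse, List.all_cons, List.all_eq_true, Bool.and_eq_true, beq_iff_eq]
          constructor
          · rintro ⟨h1, h2⟩
            exact ⟨h2, by simpa using h1, 0, by simp [rep]⟩
          · rintro ⟨h1, h2, -⟩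
            exact ⟨by simp [h2], h1⟩
      | cons c r =>
          rw [go_succ_cons]
          by_cases hpre : w.isPrefixOf (c :: r) = true
          · rw [if_pos hpre]
            have hp : w <+: (c :: r) := List.isPrefixOf_iff_prefix.mp hpre
            obtain ⟨t, ht⟩ := hp
            have hwlen : 1 ≤ w.length := by
              cases w with | nil => exact absurd rfl hw | cons _ _ => simp
            have hdrop : (c :: r).drop w.length = t := by
              rw [← ht]; exact List.drop_left (l₁ := w) (l₂ := t)
            have hlt : ((c :: r).drop w.length).length < f := by
              rw [hdrop]
              have hlen : (c :: r).length = w.length + t.length := by rw [← ht]; simp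
              omega
            rw [ih _ _ _ hlt]
            constructor
            · rintro ⟨h1, -, k, hk⟩
              refine ⟨fun a ha => h1 a (by simp [ha]), ?_, k + 1, ?_⟩
              · have := h1 cur.reverse (by simp)
                simpa using this
              · rw [rep_succ, ← hk, hdrop, ht]
            · rintro ⟨h1, h2, k, hk⟩
              have hkpos : ∃ k', k = k' + 1 := by
                cases k with
                | zero => exfalso; simp [rep] at hk
                | succ k' => exact ⟨k', rfl⟩
              obtain ⟨k', rfl⟩ := hkpos
              rw [rep_succ] at hk
              refine ⟨?_, rfl, k', ?_⟩
              · intro a ha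
                rcases List.mem_cons.mp ha with h' | h'
                · simp [h', h2]
                · exact h1 a h'
              · rw [hdrop]
                have : w ++ t = w ++ rep k' w := by rw [ht, hk]
                exact List.append_cancel_left this
          · rw [if_neg hpre]
            have hlt : r.length < f := by simp at h; omega
            rw [ih _ _ _ hlt]
            constructor
            · rintro ⟨-, h2, -⟩; exact absurd h2 (by simp)
            · rintro ⟨-, -, k, hk⟩
              exfalso
              have hkpos : ∃ k', k = k' + 1 := by
                cases k with
                | zero => exfalso; simp [rep] at hk
                | succ k' => exact ⟨k', rfl⟩
              obtain ⟨k', rfl⟩ := hkpos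
              rw [rep_succ] at hk
              exact hpre (List.isPrefixOf_iff_prefix.mpr ⟨rep k' w, hk.symm⟩)

theorem splitOn_allEmpty (l w : List Char) (hw : w ≠ []) :
    ((PySem.Chars.splitOn l w).all (fun p => p == ([] : List Char))) = true ↔ ∃ k, l = rep k w := by
  unfold PySem.Chars.splitOn
  rw [go_allEmpty w hw (l.length + 1) l [] [] (by omega)]
  simp

-- A's head test at width j (window length j+1) is exactly "cs tiles by its (j+1)-prefix"
theorem head_test_iff (cs : List Char) (j : Nat) (hj : j < cs.length) :
    (((PySem.Chars.splitOn cs (cs.take (j + 1))).map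
        (fun partition => partition == ([] : List Char))).all (fun b => b)) = true
      ↔ ∃ k, cs = rep k (cs.take (j + 1)) := by
  have hne : cs.take (j + 1) ≠ [] := by
    cases cs with
    | nil => simp at hj
    | cons a t => simp [List.take]
  rw [List.all_map]
  have : ((fun b => b) ∘ fun partition => partition == ([] : List Char))
      = fun partition => partition == ([] : List Char) := rfl
  rw [this]
  exact splitOn_allEmpty cs (cs.take (j + 1)) hne

-- ===== rotation / periodicity lemmas for the B side =====

-- tiling implies rotation invariance by the tile width
theorem rotate_of_tiling (w : List Char) (k : Nat) (hk : 1 ≤ k) :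
    (rep k w).rotate w.length = rep k w := by
  obtain ⟨k', rfl⟩ : ∃ k', k = k' + 1 := ⟨k - 1, by omega⟩
  have hle : w.length ≤ (rep (k' + 1) w).length := by
    rw [length_rep]; exact Nat.le_mul_of_pos_left w.length (by omega)
  rw [List.rotate_eq_drop_append_take hle]
  conv_lhs => rw [rep_succ]
  rw [List.drop_left, List.take_left]
  rw [← rep_succ' k' w]

-- rotation by any multiple of a fixing shift still fixes
theorem rotate_mul_fix (l : List Char) (d : Nat) (h : l.rotate d = l) (q : Nat) :
    l.rotate (q * d) = l := by
  induction q with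
  | zero => simp
  | succ q ih =>
      have : (q + 1) * d = q * d + d := by ring
      rw [this, ← List.rotate_rotate, ih, h]

-- the minimal positive fixing shift divides the length
theorem dvd_of_min_rotate (l : List Char) (d : Nat) (hd1 : 1 ≤ d) (hdn : d ≤ l.length)
    (hPd : l.rotate d = l) (hmin : ∀ i, 1 ≤ i → i < d → l.rotate i ≠ l) :
    d ∣ l.length := by
  have hr : l.rotate (l.length % d) = l := by
    have hsplit : l.length = (l.length / d) * d + l.length % d := (Nat.div_add_mod' _ _).symm
    have h1 : l.rotate l.length = l := List.rotate_length l
    rw [hsplit, ← List.rotate_rotate, rotate_mul_fix l d hPd] at h1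
    exact h1
  rcases Nat.eq_zero_or_pos (l.length % d) with h0 | hpos
  · exact Nat.dvd_of_mod_eq_zero h0
  · exact absurd hr (hmin _ hpos (Nat.mod_lt _ (by omega)))

-- rotation invariance gives index periodicity
theorem getElem_period (l : List Char) (d : Nat) (hd : 1 ≤ d) (h : l.rotate d = l) :
    ∀ j (hj : j < l.length) (hj2 : j % d < l.length), l[j] = l[j % d] := by
  intro j
  induction j using Nat.strong_induction_on with
  | _ j ih =>
      intro hj hj2
      by_cases hjd : j < d
      · simp [Nat.mod_eq_of_lt hjd]
      · have hd_le : d ≤ j := by omega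
        have hstep : l[j - d]'(by omega) = l[j] := by
          have hg := List.getElem_rotate l d (j - d) (by rw [List.length_rotate]; omega)
          simp only [h] at hg
          have heq : (j - d + d) % l.length = j := by
            rw [Nat.sub_add_cancel hd_le]; exact Nat.mod_eq_of_lt hj
          simp only [heq] at hg
          exact hg
        have hmod : (j - d) % d = j % d := (Nat.mod_eq_sub_mod hd_le).symm
        have := ih (j - d) (by omega) (by omega) (by omega)
        rw [← hstep]
        simp only [hmod] at this ⊢
        exact this

-- indexing into a tiling
theorem getElem_rep (w : List Char) (hw : 1 ≤ w.length) :
    ∀ (k : Nat) (j : Nat) (hj : j < (rep k w).length),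
      (rep k w)[j] = w[j % w.length]'(Nat.mod_lt j hw) := by
  intro k
  induction k with
  | zero => intro j hj; simp [rep] at hj
  | succ k ih =>
      intro j hj
      have hj' : j < (w ++ rep k w).length := by rw [← rep_succ]; exact hj
      have hcast : (rep (k + 1) w)[j] = (w ++ rep k w)[j]'hj' := by
        simp only [rep_succ]
      refine hcast.trans ?_
      rw [List.getElem_append]
      split_ifs with h'
      · simp [Nat.mod_eq_of_lt h']
      · have hle : w.length ≤ j := by omega
        have hmod : (j - w.length) % w.length = j % w.length := (Nat.mod_eq_sub_mod hle).symm
        have := ih (j - w.length) (by simp at hj' ⊢; omega)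
        simp only [hmod] at this
        exact this

-- rotation invariance by a divisor of the length gives an exact tiling
theorem tiling_of_rotate (l : List Char) (d : Nat) (hd : 1 ≤ d) (hdn : d ≤ l.length)
    (hdvd : d ∣ l.length) (h : l.rotate d = l) :
    l = rep (l.length / d) (l.take d) := by
  have htl : (l.take d).length = d := by simp [List.length_take]; omega
  apply List.ext_getElem
  · rw [length_rep, htl]
    exact (Nat.div_mul_cancel hdvd).symm
  · intro i h1 h2
    have hrep := getElem_rep (l.take d) (by omega) (l.length / d) i h2
    have hper := getElem_period l d hd h i h1 (lt_of_le_of_lt (Nat.mod_le i d) h1)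
    rw [hrep]
    have hmodlt : i % d < d := Nat.mod_lt i (by omega)
    have htake : (l.take d)[i % (l.take d).length]'(Nat.mod_lt i (by omega))
        = l[i % d]'(by omega) := by
      simp only [htl]
      rw [List.getElem_take]
    rw [htake]
    exact hper

-- "cs occurs in cs++cs at offset i (1 ≤ i ≤ n)" ↔ "rotating cs by i fixes it"
theorem prefix_drop_iff_rotate (cs : List Char) (i : Nat) (hi1 : 1 ≤ i) (hin : i ≤ cs.length) :
    (cs <+: (cs ++ cs).drop i) ↔ cs.rotate i = cs := by
  rw [List.drop_append_of_le_length hin]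
  rw [List.prefix_iff_eq_take]
  rw [List.take_append]
  have h1 : cs.take (cs.length - (cs.drop i).length) = cs.take i := by
    congr 1
    simp [List.length_drop]
    omega
  rw [h1]
  have h2 : (cs.drop i).take cs.length = cs.drop i := by
    apply List.take_of_length_le
    simp [List.length_drop]
  rw [h2]
  rw [List.rotate_eq_drop_append_take hin]
  exact ⟨fun h => h.symm, fun h => h.symm⟩

-- A's loop, started at width j below the minimal fixing shift d, returns B's value
theorem loop_eq (cs : List Char) (d : Nat) (hd1 : 1 ≤ d) (hdn : d ≤ cs.length)
    (hPd : cs.rotate d = cs) (hmin : ∀ i, 1 ≤ i → i < d → cs.rotate i ≠ cs) :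
    ∀ (m j : Nat), d - j ≤ m → j < d →
      solutionAux cs (PySem.List.pyRange (j : Int) (cs.length : Int) 1)
        = (if (d : Int) < (cs.length : Int) then PySem.Int.floordiv (cs.length : Int) (d : Int) else 0) := by
  intro m
  induction m with
  | zero => intro j hm hj; omega
  | succ m ih =>
      intro j hm hj
      have hjn : j < cs.length := by omega
      rw [PySem.List.pyRange_one_cons (by exact_mod_cast hjn)]
      rw [solutionAux]
      have hslice : PySem.List.slice cs (some 0) (some ((j : Int) + 1)) = cs.take (j + 1) := by
        have h := PySem.List.slice_natCast cs 0 (j + 1)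
        push_cast at h
        simpa using h
      rw [hslice]
      have htake_len : (cs.take (j + 1)).length = j + 1 := by
        simp [List.length_take]; omega
      by_cases hcase : j + 1 = d
      · -- head succeeds: cs tiles by its d-prefix; A returns the count, = B's value
        subst hcase
        have hn0 : 0 < cs.length := by omega
        have hdvd : (j + 1) ∣ cs.length := dvd_of_min_rotate cs (j + 1) hd1 hdn hPd hmin
        have htile : cs = rep (cs.length / (j + 1)) (cs.take (j + 1)) :=
          tiling_of_rotate cs (j + 1) hd1 hdn hdvd hPd
        set k := cs.length / (j + 1) with hkdef
        have hlen : cs.length = k * (j + 1) := by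
          rw [hkdef, Nat.div_mul_cancel hdvd]
        have hne : cs.take (j + 1) ≠ [] := by
          intro h0; rw [h0] at htake_len; simp at htake_len
        have hsplit : PySem.Chars.splitOn cs (cs.take (j + 1)) = List.replicate (k + 1) ([] : List Char) := by
          nth_rewrite 1 [htile]
          exact splitOn_rep (cs.take (j + 1)) hne k
        rw [hsplit]
        have hcond : ((List.replicate (k + 1) ([] : List Char)).map
            (fun partition => partition == ([] : List Char))).all (fun b => b) = true := by
          simp
        rw [if_pos hcond]
        have hcount : ((((List.replicate (k + 1) ([] : List Char)).map
            (fun partition => partition == ([] : List Char))).length : Int) - 1) = (k : Int) := by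
          simp
        rw [hcount]
        have hfd : PySem.Int.floordiv (cs.length : Int) ((j : Int) + 1) = (k : Int) := by
          have hcast : ((j : Int) + 1) = ((j + 1 : Nat) : Int) := by push_cast; ring
          rw [hcast, PySem.Int.floordiv_natCast]
        have hiff : (1 : Int) < (k : Int) ↔ ((j : Int) + 1) < (cs.length : Int) := by
          constructor
          · intro hk2
            have : 2 ≤ k := by exact_mod_cast hk2
            have : cs.length ≥ 2 * (j + 1) := by rw [hlen]; nlinarith
            push_cast; omega
          · intro hlt
            have hlt' : j + 1 < cs.length := by exact_mod_cast hlt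
            have : 1 < k := by nlinarith
            exact_mod_cast this
        by_cases hlast : ((j : Int) + 1) < (cs.length : Int)
        · rw [if_pos (hiff.mpr hlast)]
          rw [if_pos (by push_cast at hlast ⊢; exact_mod_cast hlast)]
          rw [← hfd]
          push_cast
          rfl
        · rw [if_neg (fun h => hlast (hiff.mp h))]
          rw [if_neg (by push_cast at hlast ⊢; exact_mod_cast hlast)]
      · -- head fails: a tiling at width j would fix cs under rotation by j+1 < d
        have hj1d : j + 1 < d := by omega
        have hcondA : ¬ (((PySem.Chars.splitOn cs (cs.take (j + 1))).map
            (fun partition => partition == ([] : List Char))).all (fun b => b) = true) := by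
          rw [head_test_iff cs j hjn]
          rintro ⟨k, hk⟩
          have hn0 : 0 < cs.length := by omega
          have hkpos : 1 ≤ k := by
            rcases Nat.eq_zero_or_pos k with h0 | h1
            · exfalso
              rw [h0] at hk
              simp [rep] at hk
              rw [hk] at hn0
              simp at hn0
            · exact h1
          have hrot : cs.rotate (j + 1) = cs := by
            have := rotate_of_tiling (cs.take (j + 1)) k hkpos
            rw [htake_len] at this
            nth_rewrite 1 [hk]
            rw [this, ← hk]
          exact hmin (j + 1) (by omega) hj1d hrot
        rw [if_neg hcondA]
        have h2 := ih (j + 1) (by omega) hj1d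
        push_cast at h2 ⊢
        exact h2

-- ===== VERDICT (by name: the statement is the Claim_ definition above) =====
theorem solution_spec : Claim_equal_solution := by
  intro s _
  unfold Spec_solution solution solution_alt
  simp only [PySem.Str.findFrom_eq, String.toList_append]
  rcases eq_or_ne s.toList [] with hnil | hne0
  · rw [hnil]
    norm_num [PySem.List.pyRange_one_eq_nil, solutionAux]
  · set cs := s.toList with hcs
    have hn0 : 0 < cs.length := List.length_pos_of_ne_nil hne0
    have hne : ¬ ((cs.length : Int) = 0) := by exact_mod_cast Nat.pos_iff_ne_zero.mp hn0
    rw [if_neg hne]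
    -- analyse the find
    have hk2n : 1 ≤ (cs ++ cs).length := by simp; omega
    have hF_ne : PySem.Chars.findFrom (cs ++ cs) cs ((1 : Nat) : Int) ≠ -1 := by
      intro hbad
      rw [PySem.Chars.findFrom_natCast_eq_neg_one_iff (cs ++ cs) cs 1 hk2n] at hbad
      apply hbad
      have hsuf : cs <:+ (cs ++ cs).drop 1 := by
        rw [List.drop_append_of_le_length (by omega)]
        exact ⟨cs.drop 1, rfl⟩
      exact hsuf.isInfix
    obtain ⟨hF1, hFpre, hFmin⟩ :=
      PySem.Chars.findFrom_natCast_spec (cs ++ cs) cs 1 hk2n hF_ne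
    simp only [Nat.cast_one] at hF1 hFpre hFmin
    set F := PySem.Chars.findFrom (cs ++ cs) cs (1 : Int) with hFdef
    set d := F.toNat with hddef
    have hd1 : 1 ≤ d := by omega
    have hFd : F = (d : Int) := by omega
    have hdn : d ≤ cs.length := by
      by_contra hgt
      push_neg at hgt
      have hocc : cs <+: (cs ++ cs).drop cs.length := by
        rw [List.drop_left]
      exact hFmin cs.length (by omega) hgt hocc
    have hPd : cs.rotate d = cs :=
      (prefix_drop_iff_rotate cs d hd1 hdn).mp hFpre
    have hmin : ∀ i, 1 ≤ i → i < d → cs.rotate i ≠ cs := by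
      intro i hi1 hid hrot
      exact hFmin i hi1 hid ((prefix_drop_iff_rotate cs i hi1 (by omega)).mpr hrot)
    have hmain := loop_eq cs d hd1 hdn hPd hmin d 0 (by omega) (by omega)
    simp only [Nat.cast_zero] at hmain
    rw [hmain, hFd]
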